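-- pv_equiv track=rewrite | github.com/daniel-reich/ubiquitous-fiesta | fsNMnyjMkErQtvpMW_21.py | holes
-- ===== SOURCE A (Python) =====
-- def holes(num):
--   num = str(num)
--   ret = 0
--   for i in num:
--     if i in '4690':
--       ret+=1
--     elif i=='8':
--       ret+=2
--   return ret
-- ===== SOURCE B (Python) =====
-- def holes(num):
--   n = abs(num)
--   w = (1, 0, 0, 0, 1, 0, 1, 0, 2, 1)
--   total = w[n % 10]
--   while n >= 10:
--     n //= 10
--     total += w[n % 10]
--   return total
-- ===== Notes on version B (the rewrite author's own statement) =====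
-- stated objective: alternative
-- what changed: Replaces A's string conversion and per-character branching loop with pure integer arithmetic: digits are extracted from abs(num) by repeated division by ten and scored through a weight table indexed by the last digit, never building a string.
import Mathlib
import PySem

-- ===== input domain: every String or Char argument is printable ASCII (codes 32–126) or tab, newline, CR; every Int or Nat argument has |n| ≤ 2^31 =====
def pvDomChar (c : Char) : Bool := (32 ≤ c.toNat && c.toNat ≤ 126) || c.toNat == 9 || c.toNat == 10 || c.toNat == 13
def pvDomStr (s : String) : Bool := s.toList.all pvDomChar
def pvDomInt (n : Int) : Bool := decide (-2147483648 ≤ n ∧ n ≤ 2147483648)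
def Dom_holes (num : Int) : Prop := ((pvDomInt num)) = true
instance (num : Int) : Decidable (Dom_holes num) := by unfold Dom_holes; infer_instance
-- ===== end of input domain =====

-- B replaces A's string conversion + per-character loop with pure integer arithmetic:
-- repeated division by 10 on abs(num) with a weight table indexed by n % 10 (objective: alternative).

-- ===== PORT A =====
-- 'i in "4690"' for a single char i is membership of i in the string's characters (exact here since i has length 1)
def holes (num : Int) : Int :=
  (PySem.Int.toStr num).toList.foldl
    (fun ret i =>
      if ("4690".toList.contains i) then ret + 1
      else if i == '8' then ret + 2
      else ret) 0

-- ===== PORT B =====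
-- the tuple w = (1,0,0,0,1,0,1,0,2,1); w[k] for k = n % 10 < 10, so getD never uses its default
def wTab (k : Nat) : Int := ([1, 0, 0, 0, 1, 0, 1, 0, 2, 1] : List Int).getD k 0

-- the 'while n >= 10: n //= 10; total += w[n % 10]' loop
def holesLoop (n : Nat) (total : Int) : Int :=
  if 10 ≤ n then holesLoop (n / 10) (total + wTab ((n / 10) % 10)) else total
termination_by n
decreasing_by exact Nat.div_lt_self (by omega) (by omega)

def holes_alt (num : Int) : Int :=
  holesLoop num.natAbs (wTab (num.natAbs % 10))

-- ===== PRECONDITION & SPEC =====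
def Spec_holes (num : Int) (out : Int) : Prop := out = holes_alt num
instance (num : Int) (out : Int) : Decidable (Spec_holes num out) := by unfold Spec_holes; infer_instance

-- ===== CLAIM (what is proved, stated in full; the proofs are below) =====
def Claim_equal_holes : Prop := ∀ (num : Int), Dom_holes num → Spec_holes num (holes num)

-- ===== LEMMAS AND PROOFS =====

-- per-character weight of A's branch
def wChar (c : Char) : Int :=
  if ("4690".toList.contains c) then 1 else if c == '8' then 2 else 0

theorem pv_step (a : Int) (c : Char) :
    (if ("4690".toList.contains c) then a + 1 else if c == '8' then a + 2 else a)
      = a + wChar c := by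
  unfold wChar; split_ifs <;> ring

theorem pv_sumW_acc (l : List Char) : ∀ (a : Int),
    l.foldl (fun s c => s + wChar c) a = a + l.foldl (fun s c => s + wChar c) 0 := by
  induction l with
  | nil => intro a; simp
  | cons h t ih =>
    intro a
    simp only [List.foldl_cons]
    rw [ih (a + wChar h), ih (0 + wChar h)]
    ring

theorem pv_foldl_acc (l : List Char) : ∀ (a : Int),
    l.foldl (fun ret i =>
      if ("4690".toList.contains i) then ret + 1
      else if i == '8' then ret + 2
      else ret) a
    = a + l.foldl (fun s c => s + wChar c) 0 := by
  induction l with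
  | nil => intro a; simp
  | cons h t ih =>
    intro a
    simp only [List.foldl_cons]
    rw [ih, pv_sumW_acc t (0 + wChar h), pv_step]
    ring

theorem pv_wChar_digitChar (m : Nat) (hm : m < 10) :
    wChar (Nat.digitChar m) = wTab m := by
  interval_cases m <;> decide

theorem pv_tdc_append (b : Nat) : ∀ (fuel n : Nat) (ds : List Char),
    Nat.toDigitsCore b fuel n ds = Nat.toDigitsCore b fuel n [] ++ ds := by
  intro fuel
  induction fuel with
  | zero => intro n ds; simp [Nat.toDigitsCore]
  | succ f ih =>
    intro n ds
    simp only [Nat.toDigitsCore]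
    by_cases h : n / b = 0
    · simp [h]
    · rw [if_neg h, if_neg h, ih (n / b) ((n % b).digitChar :: ds),
          ih (n / b) [(n % b).digitChar]]
      simp

theorem pv_holesLoop_acc : ∀ (n : Nat) (a b : Int),
    holesLoop n (a + b) = a + holesLoop n b := by
  intro n
  induction n using Nat.strong_induction_on with
  | _ n ih =>
    intro a b
    unfold holesLoop
    by_cases h : 10 ≤ n
    · rw [if_pos h, if_pos h, add_assoc,
          ih (n / 10) (Nat.div_lt_self (by omega) (by omega)) a (b + wTab (n / 10 % 10))]
    · rw [if_neg h, if_neg h]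

theorem pv_main : ∀ (fuel n : Nat), n < fuel →
    (Nat.toDigitsCore 10 fuel n []).foldl (fun s c => s + wChar c) 0
      = holesLoop n (wTab (n % 10)) := by
  intro fuel
  induction fuel with
  | zero => omega
  | succ f ih =>
    intro n hn
    simp only [Nat.toDigitsCore]
    by_cases h : n / 10 = 0
    · rw [if_pos h]
      have h10 : ¬ 10 ≤ n := by omega
      rw [holesLoop, if_neg h10]
      simp [pv_wChar_digitChar (n % 10) (by omega)]
    · rw [if_neg h, pv_tdc_append 10 f (n / 10) [(n % 10).digitChar]]
      rw [List.foldl_append]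
      have hlt : n / 10 < f := by
        have : n / 10 < n := Nat.div_lt_self (by omega) (by omega)
        omega
      rw [pv_sumW_acc [(n % 10).digitChar]
            ((Nat.toDigitsCore 10 f (n / 10) []).foldl (fun s c => s + wChar c) 0),
          ih (n / 10) hlt]
      have h10 : 10 ≤ n := by omega
      conv_rhs => rw [holesLoop]
      rw [if_pos h10]
      simp only [List.foldl_cons, List.foldl_nil, zero_add,
        pv_wChar_digitChar (n % 10) (by omega)]
      rw [pv_holesLoop_acc (n / 10) (wTab (n % 10)) (wTab (n / 10 % 10))]
      ring

-- ===== VERDICT (by name: the statement is the Claim_ definition above) =====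
theorem holes_spec : Claim_equal_holes := by
  intro num _
  unfold Spec_holes holes holes_alt
  rw [PySem.Int.toList_toStr]
  unfold PySem.Int.toChars
  by_cases hneg : num < 0
  · rw [if_pos hneg]
    have habs : num.toNat = 0 := by omega
    simp only [List.foldl_cons]
    have hm : ¬ ("4690".toList.contains '-') = true := by decide
    rw [if_neg hm, if_neg (by decide : ¬ ('-' == '8') = true)]
    unfold Nat.toDigits
    rw [pv_foldl_acc, pv_main (num.natAbs + 1) num.natAbs (by omega)]
    simp
  · rw [if_neg hneg]
    have habs : num.toNat = num.natAbs := by omega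
    rw [habs]
    unfold Nat.toDigits
    rw [pv_foldl_acc, pv_main (num.natAbs + 1) num.natAbs (by omega)]
    simp
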